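-- pv_equiv track=rewrite | github.com/Sathyashree1210/classwork | multi liner recursion 3.py | total_attributes
-- ===== SOURCE A (Python) =====
-- def total_attributes(data, index=0):
--     if index == len(data):
--         return 0, 0, 0, 0
--     elif index < len(data):
--         sales, shop_size, employees, salary = data[index]
--         s_sales, s_size, s_emp, s_salary = total_attributes(data, index + 1)
--         return (
--             sales + s_sales,
--             shop_size + s_size,
--             employees + s_emp,
--             salary + s_salary
--         )
--     else:
--         return 0, 0, 0, 0
-- ===== SOURCE B (Python) =====
-- def total_attributes(data, index=0):
--     sales_t, size_t, emp_t, sal_t = 0, 0, 0, 0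
--     for i in range(index, len(data)):
--         sales, shop_size, employees, salary = data[i]
--         sales_t += sales
--         size_t += shop_size
--         emp_t += employees
--         sal_t += salary
--     return sales_t, size_t, emp_t, sal_t
-- ===== Notes on version B (the rewrite author's own statement) =====
-- stated objective: idiomatic
-- what changed: Replaces the multi-line recursion with a single iterative pass keeping four accumulators over range(index, len(data)).
import Mathlib
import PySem

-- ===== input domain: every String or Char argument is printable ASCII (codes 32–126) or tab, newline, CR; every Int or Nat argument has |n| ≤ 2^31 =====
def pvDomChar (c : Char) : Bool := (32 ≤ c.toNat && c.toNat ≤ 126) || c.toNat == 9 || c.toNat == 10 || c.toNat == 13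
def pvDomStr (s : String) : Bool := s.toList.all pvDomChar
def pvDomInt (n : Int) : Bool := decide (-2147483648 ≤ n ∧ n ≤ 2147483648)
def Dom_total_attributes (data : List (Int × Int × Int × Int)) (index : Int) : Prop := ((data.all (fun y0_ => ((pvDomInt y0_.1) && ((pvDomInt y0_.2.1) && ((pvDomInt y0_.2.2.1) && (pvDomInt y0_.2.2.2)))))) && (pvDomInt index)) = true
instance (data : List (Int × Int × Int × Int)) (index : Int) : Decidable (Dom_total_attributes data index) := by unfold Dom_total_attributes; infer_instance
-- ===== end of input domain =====

-- B replaces A's multi-line recursion with a single iterative pass keeping four accumulators (idiomatic; same return value).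


-- ===== PORT A =====
-- literal port of A: recursion on index; the 'none' branch of pyGet? is Python's IndexError, excluded by Pre_
def total_attributes (data : List (Int × Int × Int × Int)) (index : Int) : Int × Int × Int × Int :=
  if index = (data.length : Int) then (0, 0, 0, 0)
  else if index < (data.length : Int) then
    match PySem.List.pyGet? data index with
    | none => (0, 0, 0, 0)  -- IndexError in Python (index < -len); outside Pre_
    | some (sales, shop_size, employees, salary) =>
      let s := total_attributes data (index + 1)
      (sales + s.1, shop_size + s.2.1, employees + s.2.2.1, salary + s.2.2.2)
  else (0, 0, 0, 0)
termination_by ((data.length : Int) - index).toNat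
decreasing_by rename_i h _; omega

-- ===== PORT B =====
-- literal port of B: one foldl over range(index, len(data)) with four accumulators
def total_attributes_alt (data : List (Int × Int × Int × Int)) (index : Int) : Int × Int × Int × Int :=
  (PySem.List.pyRange index (data.length : Int) 1).foldl
    (fun acc i =>
      match PySem.List.pyGet? data i with
      | none => acc  -- IndexError in Python; outside Pre_
      | some (sales, shop_size, employees, salary) =>
        (acc.1 + sales, acc.2.1 + shop_size, acc.2.2.1 + employees, acc.2.2.2 + salary))
    (0, 0, 0, 0)

-- ===== PRECONDITION & SPEC =====
-- Pre_ excludes exactly index < -len(data), where Python A raises IndexError (data[index] out of range)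
def Pre_total_attributes (data : List (Int × Int × Int × Int)) (index : Int) : Prop :=
  -(data.length : Int) ≤ index
instance (data : List (Int × Int × Int × Int)) (index : Int) : Decidable (Pre_total_attributes data index) := by unfold Pre_total_attributes; infer_instance
def pvWitness_total_attributes : (List (Int × Int × Int × Int)) × Int := ([(1, 2, 3, 4), (5, 6, 7, 8)], 0)

def Spec_total_attributes (data : List (Int × Int × Int × Int)) (index : Int) (out : Int × Int × Int × Int) : Prop := out = total_attributes_alt data index
instance (data : List (Int × Int × Int × Int)) (index : Int) (out : Int × Int × Int × Int) : Decidable (Spec_total_attributes data index out) := by unfold Spec_total_attributes; infer_instance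

-- ===== CLAIM (what is proved, stated in full; the proofs are below) =====
def Claim_equal_total_attributes : Prop := ∀ (data : List (Int × Int × Int × Int)) (index : Int), Dom_total_attributes data index → Pre_total_attributes data index → Spec_total_attributes data index (total_attributes data index)

-- ===== LEMMAS AND PROOFS =====

-- the body of B's fold adds a per-index contribution to the accumulator
def pvRow (data : List (Int × Int × Int × Int)) (i : Int) : Int × Int × Int × Int :=
  match PySem.List.pyGet? data i with
  | none => (0, 0, 0, 0)
  | some r => r

def pvAdd (a b : Int × Int × Int × Int) : Int × Int × Int × Int :=
  (a.1 + b.1, a.2.1 + b.2.1, a.2.2.1 + b.2.2.1, a.2.2.2 + b.2.2.2)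

lemma pvStep (data : List (Int × Int × Int × Int)) (acc : Int × Int × Int × Int) (i : Int) :
    (match PySem.List.pyGet? data i with
      | none => acc
      | some (sales, shop_size, employees, salary) =>
        (acc.1 + sales, acc.2.1 + shop_size, acc.2.2.1 + employees, acc.2.2.2 + salary))
      = pvAdd acc (pvRow data i) := by
  unfold pvRow pvAdd
  cases h : PySem.List.pyGet? data i with
  | none => simp
  | some r => obtain ⟨a, b, c, d⟩ := r; simp

lemma pvAlt_eq (data : List (Int × Int × Int × Int)) (index : Int) :
    total_attributes_alt data index
      = (PySem.List.pyRange index (data.length : Int) 1).foldl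
          (fun acc i => pvAdd acc (pvRow data i)) (0, 0, 0, 0) := by
  unfold total_attributes_alt
  congr 1
  funext acc i
  exact pvStep data acc i

lemma pvFoldl_shift (data : List (Int × Int × Int × Int)) (l : List Int) :
    ∀ acc, l.foldl (fun acc i => pvAdd acc (pvRow data i)) acc
      = pvAdd acc (l.foldl (fun acc i => pvAdd acc (pvRow data i)) (0, 0, 0, 0)) := by
  induction l with
  | nil => intro acc; simp [pvAdd]
  | cons x l ih =>
    intro acc
    simp only [List.foldl_cons]
    rw [ih (pvAdd acc (pvRow data x)), ih (pvAdd (0, 0, 0, 0) (pvRow data x))]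
    simp [pvAdd]; ring_nf; simp

lemma pvMain (data : List (Int × Int × Int × Int)) :
    ∀ n (index : Int), -(data.length : Int) ≤ index →
      ((data.length : Int) - index).toNat = n →
      total_attributes data index = total_attributes_alt data index := by
  intro n
  induction n with
  | zero =>
    intro index _ hn
    have hge : (data.length : Int) ≤ index := by omega
    unfold total_attributes total_attributes_alt
    rw [PySem.List.pyRange_one_eq_nil hge]
    by_cases h : index = (data.length : Int) <;> simp [h] <;> omega
  | succ n ih =>
    intro index hlo hn
    have hlt : index < (data.length : Int) := by omega
    have hget : ∃ r, PySem.List.pyGet? data index = some r := by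
      cases h : PySem.List.pyGet? data index with
      | none =>
        rw [PySem.List.pyGet?_eq_none_iff] at h
        exact absurd (by simp [PySem.Raise.InRange]; omega) h
      | some r => exact ⟨r, rfl⟩
    obtain ⟨r, hr⟩ := hget
    have hne : index ≠ (data.length : Int) := by omega
    conv_lhs => unfold total_attributes
    rw [if_neg hne, if_pos hlt, hr]
    obtain ⟨a, b, c, d⟩ := r
    have hrec := ih (index + 1) (by omega) (by omega)
    rw [pvAlt_eq, PySem.List.pyRange_one_cons hlt, List.foldl_cons, pvFoldl_shift]
    have : pvRow data index = (a, b, c, d) := by simp [pvRow, hr]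
    rw [this]
    rw [hrec, pvAlt_eq]
    simp [pvAdd]

-- ===== VERDICT (by name: the statement is the Claim_ definition above) =====
theorem total_attributes_spec : Claim_equal_total_attributes := by
  intro data index _ hpre
  unfold Spec_total_attributes
  exact pvMain data (((data.length : Int) - index).toNat) index hpre rfl
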